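-- pv_equiv track=rewrite | github.com/astrodeveloper10/dsa | src/recursion/get_total_characters.py | get_total_characters
-- ===== SOURCE A (Python) =====
-- def get_total_characters(arr, total_chars=0, index=0):
--     if not arr:
--         return None
--
--     if index >= len(arr):
--         return total_chars
--
--     """
--     Normal loop
--
--     total_characters = 0
--
--     for item in arr:
--         total_characters += len(item)
--
--     return total_characters
--     """
--
--     total_chars += len(arr[index])
--     return get_total_characters(arr, total_chars, index + 1)
-- ===== SOURCE B (Python) =====
-- def get_total_characters(arr, total_chars=0, index=0):
--     if not arr:
--         return None
--     total = total_chars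
--     for i in range(index, len(arr)):
--         total += len(arr[i])
--     return total
-- ===== Notes on version B (the rewrite author's own statement) =====
-- stated objective: idiomatic
-- what changed: Replaces the tail recursion (one call frame per element) with a single accumulator loop over range(index, len(arr)); same empty-None result and same honoring of the total_chars/index seeds.
import Mathlib
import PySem

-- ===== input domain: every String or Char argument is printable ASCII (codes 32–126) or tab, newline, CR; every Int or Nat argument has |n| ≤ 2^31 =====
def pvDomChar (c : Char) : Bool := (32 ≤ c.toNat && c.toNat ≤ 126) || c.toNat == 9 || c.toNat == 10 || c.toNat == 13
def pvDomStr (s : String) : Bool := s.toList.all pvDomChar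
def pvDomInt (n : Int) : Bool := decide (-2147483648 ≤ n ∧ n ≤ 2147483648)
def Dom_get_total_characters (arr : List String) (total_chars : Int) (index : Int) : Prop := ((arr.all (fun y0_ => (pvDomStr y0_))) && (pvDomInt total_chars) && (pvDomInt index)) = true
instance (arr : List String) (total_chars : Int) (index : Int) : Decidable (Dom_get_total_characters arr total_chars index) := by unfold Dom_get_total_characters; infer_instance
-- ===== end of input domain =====

-- B replaces A's tail recursion with a single accumulator loop over range(index, len(arr)) (idiomatic, O(1) space); return values agree; neither mutates its arguments.

-- ===== PORT A =====
-- literal transliteration of A's recursion; none = Python None (and IndexError, excluded by Pre_)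
def get_total_characters (arr : List String) (total_chars : Int) (index : Int) : Option Int :=
  if arr = [] then none
  else if _h : (arr.length : Int) ≤ index then some total_chars
  else match PySem.List.pyGet? arr index with
    | none => none  -- IndexError (outside Pre_)
    | some s => get_total_characters arr (total_chars + (PySem.Str.len s)) (index + 1)
termination_by ((arr.length : Int) - index).toNat
decreasing_by omega

-- ===== PORT B =====
-- B's loop: fold over range(index, len(arr)), Option-threaded so arr[i] raising (outside Pre_) is none
def get_total_characters_alt (arr : List String) (total_chars : Int) (index : Int) : Option Int :=
  if arr = [] then none
  else (PySem.List.pyRange index (arr.length : Int) 1).foldl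
        (fun acc i => acc.bind fun t => (PySem.List.pyGet? arr i).map fun s => t + PySem.Str.len s)
        (some total_chars)

-- ===== PRECONDITION & SPEC =====
-- Pre_ excludes exactly the inputs where Python A raises IndexError: a nonempty arr with index < -len(arr).
def Pre_get_total_characters (arr : List String) (total_chars : Int) (index : Int) : Prop :=
  arr = [] ∨ -(arr.length : Int) ≤ index
instance (arr : List String) (total_chars : Int) (index : Int) : Decidable (Pre_get_total_characters arr total_chars index) := by unfold Pre_get_total_characters; infer_instance

def pvWitness_get_total_characters : List String × Int × Int := (["ab", "c"], 0, 0)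

def Spec_get_total_characters (arr : List String) (total_chars : Int) (index : Int) (out : Option Int) : Prop := out = get_total_characters_alt arr total_chars index
instance (arr : List String) (total_chars : Int) (index : Int) (out : Option Int) : Decidable (Spec_get_total_characters arr total_chars index out) := by unfold Spec_get_total_characters; infer_instance

-- ===== CLAIM (what is proved, stated in full; the proofs are below) =====
def Claim_equal_get_total_characters : Prop := ∀ (arr : List String) (total_chars : Int) (index : Int), Dom_get_total_characters arr total_chars index → Pre_get_total_characters arr total_chars index → Spec_get_total_characters arr total_chars index (get_total_characters arr total_chars index)

-- ===== LEMMAS AND PROOFS =====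

lemma gtc_eq (arr : List String) (hne : arr ≠ []) :
    ∀ (n : Nat) (tc index : Int), ((arr.length : Int) - index).toNat = n →
      -(arr.length : Int) ≤ index →
      get_total_characters arr tc index = get_total_characters_alt arr tc index := by
  intro n
  induction n with
  | zero =>
    intro tc index hn hlo
    have hge : (arr.length : Int) ≤ index := by omega
    rw [get_total_characters, get_total_characters_alt]
    simp [hne, hge, PySem.List.pyRange_one_eq_nil hge]
  | succ n ih =>
    intro tc index hn hlo
    have hlt : index < (arr.length : Int) := by omega
    have hget : ∃ s, PySem.List.pyGet? arr index = some s := by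
      have : PySem.List.pyGet? arr index ≠ none := by
        intro hnone
        exact ((PySem.List.pyGet?_eq_none_iff arr index).mp hnone) ⟨hlo, hlt⟩
      exact Option.ne_none_iff_exists'.mp this
    obtain ⟨s, hs⟩ := hget
    rw [get_total_characters, get_total_characters_alt]
    simp only [hne, if_false, not_le.mpr hlt, hs]
    rw [PySem.List.pyRange_one_cons hlt]
    simp only [List.foldl_cons, Option.bind_some, hs, Option.map_some]
    have := ih (tc + PySem.Str.len s) (index + 1) (by omega) (by omega)
    rw [this, get_total_characters_alt]
    simp [hne]

-- ===== VERDICT (by name: the statement is the Claim_ definition above) =====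
theorem get_total_characters_spec : Claim_equal_get_total_characters := by
  intro arr tc index _ hpre
  unfold Spec_get_total_characters
  by_cases hne : arr = []
  · subst hne
    rw [get_total_characters, get_total_characters_alt]
    simp
  · rcases hpre with h | hlo
    · exact absurd h hne
    · exact gtc_eq arr hne _ tc index rfl hlo
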